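-- pv_equiv track=rewrite | github.com/Hassnaa-H/Python_Game_GP_B | backend.py | trim_moves_inside_path
-- ===== SOURCE A (Python) =====
-- LEVEL_SEQUENCES = {
--     'Level_1': ['right','right','right','right','down','down','left','left','left','left','down','down','right','right','right','right'],
--     'Level_2': ['right', 'right','right','down','down', 'right'],
--     'Level_3': ['right', 'right','right','right', 'down', 'down','left', 'left', 'left', 'down', 'down','right','right','right'],
--     'Level_4': ['right', 'up','right','right','right','right','down', 'down','right', 'right'],
--     'Level_5': ['right', 'right', 'right', 'right','right', 'down', 'down','left', 'left', 'left', 'left','left', 'down', 'down','right', 'right', 'right', 'right','right','down', 'down','right'],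
--     'Level_6': ['right', 'right', 'right', 'right','right','down', 'down','left', 'left', 'left','left','left','down', 'down'],
--     'Level_7': ['right','right','right','right','right', 'down', 'down','left', 'left', 'left','left','left','down', 'down','right', 'right', 'right', 'right','right','down', 'down'],
--     'Level_8': ['right','up', 'right', 'right', 'right','right','up', 'right', 'right','down'],
--     'Level_9': ['down','down', 'right', 'down','down','up', 'up','up','up' ,'right', 'right','down', 'right', 'left', 'left','down','down','down', 'right','right','right','left','left','down','down','down', 'right', 'right'],
--     'Level_10': ['down','down', 'right', 'up','up', 'right', 'right','down', 'left', 'down','down','down', 'right', 'down','down','down', 'right', 'right','down']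
-- }
--
-- LEVEL_WALKABLE_POSITIONS = {
--     "Level_8": {
--         (0, 0), (1, 0), (1, -1),
--         (2, -1), (3, -1), (4, -1), (5, -1),
--         (5, -2), (6, -2), (7, -2), (7, -1),
--         (5, 0), (5, 1)
--     },
--     "Level_9": {
--         (0, 0), (0, 1), (0, 2),
--         (1, 2), (1, 3), (1, 4),
--         (1, 1), (1, 0),
--         (2, 0), (3, 0), (3, 1),
--         (4, 1), (2, 1),
--         (2, 2), (2, 3), (2, 4),
--         (3, 4), (3, 5), (3, 6), (3, 7),
--         (4, 7), (5, 7),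
--         (4, 4), (5, 4)
--     }
-- }
--
-- def build_path_positions(level):
--     target = LEVEL_SEQUENCES.get(level, [])
--     x, y = 0, 0
--     positions = {(x, y)}
--
--     for move in target:
--         if move == "right":
--             x += 1
--         elif move == "left":
--             x -= 1
--         elif move == "up":
--             y -= 1
--         elif move == "down":
--             y += 1
--         positions.add((x, y))
--
--     return positions
--
-- def get_walkable_positions(level):
--     if level in LEVEL_WALKABLE_POSITIONS:
--         return LEVEL_WALKABLE_POSITIONS[level]
--     return build_path_positions(level)
--
-- def trim_moves_inside_path(level, moves):
--     walkable = get_walkable_positions(level)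
--     x, y = 0, 0
--     valid_moves = []
--
--     for i, move in enumerate(moves):
--         next_x, next_y = x, y
--         if move == "right":
--             next_x += 1
--         elif move == "left":
--             next_x -= 1
--         elif move == "up":
--             next_y -= 1
--         elif move == "down":
--             next_y += 1
--
--         if (next_x, next_y) not in walkable:
--             return valid_moves, (x, y), i, move
--
--         valid_moves.append(move)
--         x, y = next_x, next_y
--
--     return valid_moves, (x, y), None, None
-- ===== SOURCE B (Python) =====
-- LEVEL_SEQUENCES = {
--     'Level_1': ['right','right','right','right','down','down','left','left','left','left','down','down','right','right','right','right'],
--     'Level_2': ['right', 'right','right','down','down', 'right'],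
--     'Level_3': ['right', 'right','right','right', 'down', 'down','left', 'left', 'left', 'down', 'down','right','right','right'],
--     'Level_4': ['right', 'up','right','right','right','right','down', 'down','right', 'right'],
--     'Level_5': ['right', 'right', 'right', 'right','right', 'down', 'down','left', 'left', 'left', 'left','left', 'down', 'down','right', 'right', 'right', 'right','right','down', 'down','right'],
--     'Level_6': ['right', 'right', 'right', 'right','right','down', 'down','left', 'left', 'left','left','left','down', 'down'],
--     'Level_7': ['right','right','right','right','right', 'down', 'down','left', 'left', 'left','left','left','down', 'down','right', 'right', 'right', 'right','right','down', 'down'],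
--     'Level_8': ['right','up', 'right', 'right', 'right','right','up', 'right', 'right','down'],
--     'Level_9': ['down','down', 'right', 'down','down','up', 'up','up','up' ,'right', 'right','down', 'right', 'left', 'left','down','down','down', 'right','right','right','left','left','down','down','down', 'right', 'right'],
--     'Level_10': ['down','down', 'right', 'up','up', 'right', 'right','down', 'left', 'down','down','down', 'right', 'down','down','down', 'right', 'right','down']
-- }
--
-- LEVEL_WALKABLE_POSITIONS = {
--     "Level_8": {
--         (0, 0), (1, 0), (1, -1),
--         (2, -1), (3, -1), (4, -1), (5, -1),
--         (5, -2), (6, -2), (7, -2), (7, -1),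
--         (5, 0), (5, 1)
--     },
--     "Level_9": {
--         (0, 0), (0, 1), (0, 2),
--         (1, 2), (1, 3), (1, 4),
--         (1, 1), (1, 0),
--         (2, 0), (3, 0), (3, 1),
--         (4, 1), (2, 1),
--         (2, 2), (2, 3), (2, 4),
--         (3, 4), (3, 5), (3, 6), (3, 7),
--         (4, 7), (5, 7),
--         (4, 4), (5, 4)
--     }
-- }
--
-- DELTAS = {'right': (1, 0), 'left': (-1, 0), 'up': (0, -1), 'down': (0, 1)}
--
-- def trajectory(ms):
--     """Full position trajectory starting at (0,0); unknown moves have delta (0,0)."""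
--     positions = [(0, 0)]
--     for m in ms:
--         dx, dy = DELTAS.get(m, (0, 0))
--         x, y = positions[-1]
--         positions.append((x + dx, y + dy))
--     return positions
--
-- def trim_moves_inside_path(level, moves):
--     # Staged algorithm: build the whole trajectory, then collect ALL indices whose
--     # reached position lies outside the walkable set, and cut at the minimum one.
--     # No early exit and no incremental valid-move accumulator.
--     if level in LEVEL_WALKABLE_POSITIONS:
--         walkable = LEVEL_WALKABLE_POSITIONS[level]
--     else:
--         walkable = set(trajectory(LEVEL_SEQUENCES.get(level, [])))
--     positions = trajectory(moves)
--     bad = [i for i, pos in enumerate(positions[1:]) if pos not in walkable]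
--     if not bad:
--         return list(moves), positions[-1], None, None
--     i = min(bad)
--     return moves[:i], positions[i], i, moves[i]
-- ===== Notes on version B (the rewrite author's own statement) =====
-- stated objective: alternative
-- what changed: B replaces A's fused early-exit loop (step, membership check, append to valid_moves each iteration) by staged passes: build the complete position trajectory, then collect the indices of ALL positions outside the walkable set, take the minimum such index and slice the move list there; no early exit and no incremental accumulator.
import Mathlib
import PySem

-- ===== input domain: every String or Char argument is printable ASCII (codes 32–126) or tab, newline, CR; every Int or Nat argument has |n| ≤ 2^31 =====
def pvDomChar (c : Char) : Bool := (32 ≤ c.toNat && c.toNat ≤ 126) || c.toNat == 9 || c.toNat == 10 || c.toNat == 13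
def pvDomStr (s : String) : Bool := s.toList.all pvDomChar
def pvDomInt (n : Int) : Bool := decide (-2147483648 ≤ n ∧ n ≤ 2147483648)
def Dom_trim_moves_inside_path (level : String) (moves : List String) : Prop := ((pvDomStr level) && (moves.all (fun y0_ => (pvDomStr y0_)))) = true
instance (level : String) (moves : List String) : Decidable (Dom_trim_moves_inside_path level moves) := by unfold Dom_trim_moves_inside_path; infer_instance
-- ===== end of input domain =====

-- B builds the full trajectory, then collects ALL indices whose position leaves the walkable
-- set and cuts at the minimum one, instead of A's fused early-exit loop; objective: alternative.

-- ===== PORT A =====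

def pvLevelSequences : PySem.Dict String (List String) := PySem.Dict.mk [
  ("Level_1", ["right","right","right","right","down","down","left","left","left","left","down","down","right","right","right","right"]),
  ("Level_2", ["right","right","right","down","down","right"]),
  ("Level_3", ["right","right","right","right","down","down","left","left","left","down","down","right","right","right"]),
  ("Level_4", ["right","up","right","right","right","right","down","down","right","right"]),
  ("Level_5", ["right","right","right","right","right","down","down","left","left","left","left","left","down","down","right","right","right","right","right","down","down","right"]),
  ("Level_6", ["right","right","right","right","right","down","down","left","left","left","left","left","down","down"]),
  ("Level_7", ["right","right","right","right","right","down","down","left","left","left","left","left","down","down","right","right","right","right","right","down","down"]),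
  ("Level_8", ["right","up","right","right","right","right","up","right","right","down"]),
  ("Level_9", ["down","down","right","down","down","up","up","up","up","right","right","down","right","left","left","down","down","down","right","right","right","left","left","down","down","down","right","right"]),
  ("Level_10", ["down","down","right","up","up","right","right","down","left","down","down","down","right","down","down","down","right","right","down"])]

def pvLevelWalkable : PySem.Dict String (PySem.Set (Int × Int)) := PySem.Dict.mk [
  ("Level_8", PySem.Set.ofList [((0:Int),(0:Int)), (1,0), (1,-1), (2,-1), (3,-1), (4,-1), (5,-1), (5,-2), (6,-2), (7,-2), (7,-1), (5,0), (5,1)]),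
  ("Level_9", PySem.Set.ofList [((0:Int),(0:Int)), (0,1), (0,2), (1,2), (1,3), (1,4), (1,1), (1,0), (2,0), (3,0), (3,1), (4,1), (2,1), (2,2), (2,3), (2,4), (3,4), (3,5), (3,6), (3,7), (4,7), (5,7), (4,4), (5,4)])]

-- A's if/elif chain computing the next position (used verbatim in both of A's loops)
def stepA (move : String) (x y : Int) : Int × Int :=
  if move == "right" then (x + 1, y)
  else if move == "left" then (x - 1, y)
  else if move == "up" then (x, y - 1)
  else if move == "down" then (x, y + 1)
  else (x, y)

def buildLoopA (p : Int × Int) (s : PySem.Set (Int × Int)) : List String → PySem.Set (Int × Int)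
  | [] => s
  | m :: rest =>
      let q := stepA m p.1 p.2
      buildLoopA q (PySem.Set.add s q) rest

def build_path_positions (level : String) : PySem.Set (Int × Int) :=
  buildLoopA (0, 0) (PySem.Set.ofList [((0:Int), (0:Int))]) ((PySem.Dict.get? pvLevelSequences level).getD [])

def get_walkable_positions (level : String) : PySem.Set (Int × Int) :=
  match PySem.Dict.get? pvLevelWalkable level with
  | some s => s
  | none => build_path_positions level

def trimLoopA (walk : PySem.Set (Int × Int)) (x y : Int) (acc : List String) (i : Int) :
    List String → List String × (Int × Int) × Option Int × Option String
  | [] => (acc, (x, y), none, none)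
  | move :: rest =>
      let n := stepA move x y
      if !(PySem.Set.contains walk n) then (acc, (x, y), some i, some move)
      else trimLoopA walk n.1 n.2 (acc ++ [move]) (i + 1) rest

def trim_moves_inside_path (level : String) (moves : List String) :
    List String × (Int × Int) × Option Int × Option String :=
  trimLoopA (get_walkable_positions level) 0 0 [] 0 moves

-- ===== PORT B =====

def pvDeltas : PySem.Dict String (Int × Int) :=
  PySem.Dict.mk [("right", ((1:Int), (0:Int))), ("left", (-1, 0)), ("up", (0, -1)), ("down", (0, 1))]

-- Source B's trajectory loop: positions[-1] is the accumulator p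
def trajAux (p : Int × Int) : List String → List (Int × Int)
  | [] => []
  | m :: rest =>
      let d := PySem.Dict.getD pvDeltas m (0, 0)
      let q := (p.1 + d.1, p.2 + d.2)
      q :: trajAux q rest

def trajectory (ms : List String) : List (Int × Int) := (0, 0) :: trajAux (0, 0) ms

-- Source B's comprehension [i for i, pos in enumerate(positions[1:]) if pos not in walkable]
def badIdx (walk : PySem.Set (Int × Int)) (ptail : List (Int × Int)) : List Int :=
  ((PySem.List.enumerate ptail 0).filter (fun ip => !(PySem.Set.contains walk ip.2))).map (fun ip => ip.1)

def trim_moves_inside_path_alt (level : String) (moves : List String) :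
    List String × (Int × Int) × Option Int × Option String :=
  let walk :=
    match PySem.Dict.get? pvLevelWalkable level with
    | some s => s
    | none => PySem.Set.ofList (trajectory ((PySem.Dict.get? pvLevelSequences level).getD []))
  let positions := trajectory moves
  let bad := badIdx walk (PySem.List.slice positions (some 1) none)
  match PySem.List.min? bad (fun x => x) with
  | none => (moves, PySem.List.pyGetD positions (-1) (0, 0), none, none)
  | some i =>
      -- positions[i] and moves[i]: i is a valid index here, so pyGetD with any default is exact
      (PySem.List.slice moves none (some i), PySem.List.pyGetD positions i (0, 0), some i,
        some (PySem.List.pyGetD moves i ""))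

-- ===== PRECONDITION & SPEC =====
def Spec_trim_moves_inside_path (level : String) (moves : List String) (out : List String × (Int × Int) × Option Int × Option String) : Prop := out = trim_moves_inside_path_alt level moves
instance (level : String) (moves : List String) (out : List String × (Int × Int) × Option Int × Option String) : Decidable (Spec_trim_moves_inside_path level moves out) := by unfold Spec_trim_moves_inside_path; infer_instance

-- ===== CLAIM (what is proved, stated in full; the proofs are below) =====
def Claim_equal_trim_moves_inside_path : Prop := ∀ (level : String) (moves : List String), Dom_trim_moves_inside_path level moves → Spec_trim_moves_inside_path level moves (trim_moves_inside_path level moves)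

-- ===== LEMMAS AND PROOFS =====

-- A's if/elif chain equals B's delta lookup
lemma stepA_eq_delta (m : String) (x y : Int) :
    stepA m x y = (x + (PySem.Dict.getD pvDeltas m (0, 0)).1, y + (PySem.Dict.getD pvDeltas m (0, 0)).2) := by
  by_cases h1 : m = "right"
  · subst h1; simp [stepA, pvDeltas, PySem.Dict.getD, PySem.Dict.get?]
  · by_cases h2 : m = "left"
    · subst h2; simp [stepA, pvDeltas, PySem.Dict.getD, PySem.Dict.get?]; omega
    · by_cases h3 : m = "up"
      · subst h3; simp [stepA, pvDeltas, PySem.Dict.getD, PySem.Dict.get?]; omega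
      · by_cases h4 : m = "down"
        · subst h4; simp [stepA, pvDeltas, PySem.Dict.getD, PySem.Dict.get?]
        · have e1 : ("right" == m) = false := by simp; exact fun h => h1 h.symm
          have e2 : ("left" == m) = false := by simp; exact fun h => h2 h.symm
          have e3 : ("up" == m) = false := by simp; exact fun h => h3 h.symm
          have e4 : ("down" == m) = false := by simp; exact fun h => h4 h.symm
          simp [stepA, pvDeltas, PySem.Dict.getD, PySem.Dict.get?, List.find?, e1, e2, e3, e4, h1, h2, h3, h4]

lemma stepA_pair (m : String) (p : Int × Int) :
    stepA m p.1 p.2 = (p.1 + (PySem.Dict.getD pvDeltas m (0, 0)).1, p.2 + (PySem.Dict.getD pvDeltas m (0, 0)).2) :=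
  stepA_eq_delta m p.1 p.2

lemma buildLoopA_eq_foldl (ms : List String) : ∀ (p : Int × Int) (s : PySem.Set (Int × Int)),
    buildLoopA p s ms = (trajAux p ms).foldl PySem.Set.add s := by
  induction ms with
  | nil => intro p s; rfl
  | cons m rest ih =>
      intro p s
      simp only [buildLoopA, trajAux, List.foldl_cons, stepA_pair]
      exact ih _ _

lemma build_eq (level : String) :
    build_path_positions level =
      PySem.Set.ofList (trajectory ((PySem.Dict.get? pvLevelSequences level).getD [])) := by
  rw [build_path_positions, PySem.Set.ofList_eq_foldl, trajectory, List.foldl_cons,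
    buildLoopA_eq_foldl]
  rfl

-- foldl min leaves a lower bound unchanged
lemma foldl_min_of_le (t : List Int) : ∀ (x : Int), (∀ y ∈ t, x ≤ y) → t.foldl min x = x := by
  induction t with
  | nil => intro x _; rfl
  | cons y t ih =>
      intro x h
      have hxy : min x y = x := min_eq_left (h y (by simp))
      simp only [List.foldl_cons, hxy]
      exact ih x (fun z hz => h z (by simp [hz]))

-- min of a strictly increasing Int list is its head
lemma min?_eq_head? (l : List Int) (h : l.Pairwise (· < ·)) :
    PySem.List.min? l (fun x => x) = l.head? := by
  cases l with
  | nil => simp [PySem.List.min?_eq_none_iff]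
  | cons x t =>
      rw [PySem.List.min?_id_cons]
      have : t.foldl min x = x := by
        apply foldl_min_of_le
        intro y hy
        exact le_of_lt ((List.pairwise_cons.mp h).1 y hy)
      rw [this]; rfl

-- badFrom: Source B's comprehension with a generalized enumerate start (badIdx = badFrom 0)
def badFrom (walk : PySem.Set (Int × Int)) (s : Int) (ptail : List (Int × Int)) : List Int :=
  ((PySem.List.enumerate ptail s).filter (fun ip => !(PySem.Set.contains walk ip.2))).map (fun ip => ip.1)

lemma badIdx_eq_badFrom (walk : PySem.Set (Int × Int)) (ptail : List (Int × Int)) :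
    badIdx walk ptail = badFrom walk 0 ptail := rfl

lemma badFrom_pairwise (walk : PySem.Set (Int × Int)) (s : Int) (ptail : List (Int × Int)) :
    (badFrom walk s ptail).Pairwise (· < ·) := by
  unfold badFrom
  apply List.Pairwise.map
  · exact fun a b h => h
  · exact List.Pairwise.filter _ (PySem.List.pairwise_lt_enumerate ptail s)

-- the main induction: A's loop against B's staged computation, generalized over the loop state
lemma trimLoop_eq_staged (walk : PySem.Set (Int × Int)) (moves : List String) :
    ∀ (rest : List String) (k : Nat) (p : Int × Int),
    moves.drop k = rest → (trajectory moves).drop k = p :: trajAux p rest →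
    trimLoopA walk p.1 p.2 (moves.take k) (k : Int) rest =
      match (badFrom walk (k : Int) (trajAux p rest)).head? with
      | none => (moves, PySem.List.pyGetD (trajectory moves) (-1) (0, 0), none, none)
      | some i =>
          (PySem.List.slice moves none (some i), PySem.List.pyGetD (trajectory moves) i (0, 0),
            some i, some (PySem.List.pyGetD moves i "")) := by
  intro rest
  induction rest with
  | nil =>
      intro k p hdrop htraj
      have hk : moves.length ≤ k := by
        have := congrArg List.length hdrop
        simp at this; omega
      have hlast : PySem.List.pyGetD (trajectory moves) (-1) ((0:Int),(0:Int)) = p := by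
        have h2 : trajectory moves = (trajectory moves).take k ++ [p] := by
          conv_lhs => rw [← List.take_append_drop k (trajectory moves)]
          rw [htraj]; rfl
        rw [h2, PySem.List.pyGetD_neg_one_append_singleton]
      simp [trimLoopA, trajAux, badFrom, List.take_of_length_le hk, hlast]
  | cons m rest ih =>
      intro k p hdrop htraj
      have hk : k < moves.length := by
        by_contra h
        rw [List.drop_eq_nil_of_le (by omega)] at hdrop
        exact List.cons_ne_nil _ _ hdrop.symm
      have hget : moves[k]? = some m := by
        have h0 : (List.drop k moves).head? = moves[k]? := List.head?_drop
        rw [hdrop] at h0; exact h0.symm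
      set q := (p.1 + (PySem.Dict.getD pvDeltas m (0, 0)).1,
                p.2 + (PySem.Dict.getD pvDeltas m (0, 0)).2) with hq
      have hstep : stepA m p.1 p.2 = q := stepA_pair m p
      have hposk : (trajectory moves)[k]? = some p := by
        have h0 : ((trajectory moves).drop k).head? = (trajectory moves)[k]? := List.head?_drop
        rw [htraj] at h0; exact h0.symm
      show trimLoopA walk p.1 p.2 (moves.take k) (k : Int) (m :: rest) = _
      rw [trimLoopA]
      simp only [hstep, trajAux, ← hq, badFrom, PySem.List.enumerate_cons, List.filter_cons]
      by_cases hc : PySem.Set.contains walk q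
      · simp only [hc, Bool.not_true, Bool.false_eq_true, if_false]
        have htake : moves.take k ++ [m] = moves.take (k + 1) := by
          rw [List.take_add_one, hget]; rfl
        have hdrop2 : moves.drop (k + 1) = rest := by
          rw [← List.drop_drop, hdrop]; rfl
        have htraj2 : (trajectory moves).drop (k + 1) = q :: trajAux q rest := by
          rw [← List.drop_drop, htraj]; rfl
        have hih := ih (k + 1) q hdrop2 htraj2
        unfold badFrom at hih
        rw [htake]
        push_cast at hih ⊢
        exact hih
      · simp only [hc, Bool.not_false, if_true]
        have hp : PySem.List.pyGetD (trajectory moves) ((k : Nat) : Int) ((0:Int),(0:Int)) = p := by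
          rw [PySem.List.pyGetD_natCast]
          simp [List.getD, hposk]
        have hm : PySem.List.pyGetD moves ((k : Nat) : Int) "" = m := by
          rw [PySem.List.pyGetD_natCast]
          simp [List.getD, hget]
        simp [PySem.List.slice_to_natCast, hp, hm]

lemma top_eq (walk : PySem.Set (Int × Int)) (moves : List String) :
    trimLoopA walk 0 0 [] 0 moves =
      (match PySem.List.min? (badIdx walk (PySem.List.slice (trajectory moves) (some 1) none)) (fun x => x) with
       | none => (moves, PySem.List.pyGetD (trajectory moves) (-1) (0, 0), none, none)
       | some i =>
           (PySem.List.slice moves none (some i), PySem.List.pyGetD (trajectory moves) i (0, 0),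
             some i, some (PySem.List.pyGetD moves i ""))) := by
  rw [trajectory, PySem.List.slice_from_one]
  show _ = (match PySem.List.min? (badIdx walk (trajAux (0,0) moves)) (fun x => x) with
       | none => _ | some i => _)
  rw [badIdx_eq_badFrom, min?_eq_head? _ (badFrom_pairwise walk 0 _)]
  have h := trimLoop_eq_staged walk moves moves 0 ((0:Int),(0:Int)) rfl rfl
  simpa using h

theorem trim_moves_inside_path_eq (level : String) (moves : List String) :
    trim_moves_inside_path level moves = trim_moves_inside_path_alt level moves := by
  have hwalk : get_walkable_positions level =
      (match PySem.Dict.get? pvLevelWalkable level with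
       | some s => s
       | none => PySem.Set.ofList (trajectory ((PySem.Dict.get? pvLevelSequences level).getD []))) := by
    rw [get_walkable_positions]
    cases PySem.Dict.get? pvLevelWalkable level with
    | some s => rfl
    | none => simpa using build_eq level
  rw [trim_moves_inside_path, trim_moves_inside_path_alt, hwalk]
  exact top_eq _ moves

-- ===== VERDICT (by name: the statement is the Claim_ definition above) =====
theorem trim_moves_inside_path_spec : Claim_equal_trim_moves_inside_path := by
  intro level moves _
  exact trim_moves_inside_path_eq level moves
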